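-- pv_equiv track=rewrite | github.com/lhy3944/aise-v2-backend | backend/src/services/artifact_record_svc.py | _build_display_counters
-- ===== SOURCE A (Python) =====
-- def _build_display_counters(display_ids: list[str]) -> dict[str, int]:
--     counters: dict[str, int] = {}
--     for did in display_ids:
--         prefix, sep, tail = did.rpartition("-")
--         if not sep or not prefix:
--             continue
--         try:
--             seq = int(tail)
--         except ValueError:
--             continue
--         counters[prefix] = max(counters.get(prefix, 0), seq)
--     return counters
-- ===== SOURCE B (Python) =====
-- def _build_display_counters(display_ids: list[str]) -> dict[str, int]:
--     groups: dict[str, list[int]] = {}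
--     for did in display_ids:
--         prefix, sep, tail = did.rpartition("-")
--         if not sep or not prefix:
--             continue
--         try:
--             seq = int(tail)
--         except ValueError:
--             continue
--         groups.setdefault(prefix, []).append(seq)
--     return {prefix: max(seqs) for prefix, seqs in groups.items()}
-- ===== Notes on version B (the rewrite author's own statement) =====
-- stated objective: alternative
-- what changed: B groups the parsed sequence numbers into a per-prefix list in one pass and then reduces each group with max() in a separate comprehension, instead of A's incremental running-maximum fold into the result dict.
import Mathlib
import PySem

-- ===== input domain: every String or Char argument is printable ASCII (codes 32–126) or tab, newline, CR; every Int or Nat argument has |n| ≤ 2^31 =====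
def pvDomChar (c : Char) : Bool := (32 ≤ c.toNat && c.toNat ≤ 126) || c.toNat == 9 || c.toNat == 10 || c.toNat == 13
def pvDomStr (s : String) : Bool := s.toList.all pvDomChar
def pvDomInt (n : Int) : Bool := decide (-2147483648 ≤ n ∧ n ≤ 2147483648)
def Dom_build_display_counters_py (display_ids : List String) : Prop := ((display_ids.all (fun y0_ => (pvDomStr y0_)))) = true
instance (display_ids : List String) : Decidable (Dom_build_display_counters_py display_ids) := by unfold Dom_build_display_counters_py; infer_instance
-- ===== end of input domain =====

-- B groups the parsed sequence numbers into per-prefix lists in one pass and reduces each group with max() in a second pass (alternative decomposition, same cost).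


-- ===== PORT A =====
-- hand port of s.rpartition("-") (PySem has no rpartition): some (prefix, tail) splits s
-- at its LAST '-', none when s has no '-'; exact for the one-character separator "-".
def pvRPartDash : List Char → Option (List Char × List Char)
  | [] => none
  | c :: cs =>
    match pvRPartDash cs with
    | some (p, t) => some (c :: p, t)
    | none => if c = '-' then some ([], cs) else none

-- the loop body shared verbatim by A and B: rpartition, the `not sep or not prefix` guard,
-- int(tail); none = the 'continue' cases (rpartition = none is exactly sep == "").
def pvParse? (did : String) : Option (String × Int) :=
  match pvRPartDash did.toList with
  | none => none                               -- not sep   → continue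
  | some (p, t) =>
    if p = [] then none                        -- not prefix → continue
    else
      match PySem.Int.ofChars? t with
      | none => none                           -- int(tail) raises ValueError → continue
      | some seq => some (String.ofList p, seq)

def build_display_counters_py (display_ids : List String) : List (String × Int) :=
  (display_ids.foldl
    (fun counters did =>
      match pvParse? did with
      | none => counters
      | some pr => counters.insert pr.1 (max (counters.getD pr.1 0) pr.2))
    (PySem.Dict.empty : PySem.Dict String Int)).items

-- ===== PORT B =====
-- phase 1: groups.setdefault(prefix, []).append(seq)  =  modify with default [];
-- phase 2: {prefix: max(seqs) for prefix, seqs in groups.items()} — max(seqs) is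
-- PySem.List.max?; the .getD 0 total-form default is unreachable (stored groups are nonempty).
def build_display_counters_py_alt (display_ids : List String) : List (String × Int) :=
  (display_ids.foldl
      (fun g did =>
        match pvParse? did with
        | none => g
        | some pr => g.modify pr.1 [] (· ++ [pr.2]))
      (PySem.Dict.empty : PySem.Dict String (List Int))).items.map
    (fun pr => (pr.1, (PySem.List.max? pr.2 (fun y => y)).getD 0))

-- ===== PRECONDITION & SPEC =====
def Spec_build_display_counters_py (display_ids : List String) (out : List (String × Int)) : Prop := out = build_display_counters_py_alt display_ids
instance (display_ids : List String) (out : List (String × Int)) : Decidable (Spec_build_display_counters_py display_ids out) := by unfold Spec_build_display_counters_py; infer_instance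

-- ===== CLAIM (what is proved, stated in full; the proofs are below) =====
def Claim_equal_build_display_counters_py : Prop := ∀ (display_ids : List String), Dom_build_display_counters_py display_ids → Spec_build_display_counters_py display_ids (build_display_counters_py display_ids)

-- ===== LEMMAS AND PROOFS =====

theorem pvRPartDash_eq_none (cs : List Char) (h : pvRPartDash cs = none) : '-' ∉ cs := by
  induction cs with
  | nil => simp
  | cons c cs ih =>
    cases hcs : pvRPartDash cs with
    | some q =>
      obtain ⟨q1, q2⟩ := q
      simp [pvRPartDash, hcs] at h
    | none =>
      simp only [pvRPartDash, hcs] at h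
      split_ifs at h with hc
      intro hm
      rcases List.mem_cons.mp hm with h1 | h2
      · exact hc h1.symm
      · exact ih hcs h2

-- the tail returned by rpartition("-") lies to the right of the last '-': it has no '-'
theorem pvRPartDash_no_dash (s : List Char) (p t : List Char)
    (h : pvRPartDash s = some (p, t)) : '-' ∉ t := by
  induction s generalizing p t with
  | nil => simp [pvRPartDash] at h
  | cons c cs ih =>
    cases hcs : pvRPartDash cs with
    | some q =>
      obtain ⟨q1, q2⟩ := q
      simp only [pvRPartDash, hcs, Option.some_inj, Prod.mk.injEq] at h
      exact h.2 ▸ ih q1 q2 hcs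
    | none =>
      simp only [pvRPartDash, hcs] at h
      split_ifs at h with hc
      simp only [Option.some_inj, Prod.mk.injEq] at h
      exact h.2 ▸ pvRPartDash_eq_none cs hcs

-- int(s) is nonnegative when s contains no '-'
theorem ofChars?_nonneg (cs : List Char) (n : Int) (hnd : '-' ∉ cs)
    (h : PySem.Int.ofChars? cs = some n) : 0 ≤ n := by
  have hsub : ∀ x ∈ (((cs.dropWhile PySem.Int.isIntSpace).reverse).dropWhile PySem.Int.isIntSpace).reverse, x ∈ cs := by
    intro x hx
    exact List.dropWhile_subset _ (List.mem_reverse.mp (List.dropWhile_subset _ (List.mem_reverse.mp hx)))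
  simp only [PySem.Int.ofChars?] at h
  split at h
  · rename_i es heq
    exact absurd (hsub '-' (heq ▸ List.mem_cons_self)) hnd
  all_goals
    simp only [Option.map_eq_some_iff, bind, Option.bind_eq_some_iff, pure, Option.some_inj] at h
    obtain ⟨m, ⟨a, _, ha⟩, hm⟩ := h
    subst hm
    subst ha
    exact Int.natCast_nonneg a

-- every sequence number the shared parse step accepts is nonnegative (the tail of
-- rpartition("-") cannot contain a minus sign)
theorem pvParse?_nonneg (did : String) (p : String) (n : Int)
    (h : pvParse? did = some (p, n)) : 0 ≤ n := by
  cases hrp : pvRPartDash did.toList with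
  | none => simp [pvParse?, hrp] at h
  | some q =>
    obtain ⟨pr, t⟩ := q
    simp only [pvParse?, hrp] at h
    split_ifs at h with hp
    cases hof : PySem.Int.ofChars? t with
    | none => simp [hof] at h
    | some seq =>
      simp only [hof, Option.some_inj, Prod.mk.injEq] at h
      exact h.2 ▸ ofChars?_nonneg t seq (pvRPartDash_no_dash _ _ _ hrp) hof

-- skipping the 'continue' cases = folding over the list of parsed (prefix, seq) pairs
theorem foldl_parse {ν : Type} (ids : List String) (f : ν → String × Int → ν) (d : ν) :
    ids.foldl (fun d did => match pvParse? did with | none => d | some pr => f d pr) d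
      = (ids.filterMap pvParse?).foldl f d := by
  induction ids generalizing d with
  | nil => rfl
  | cons x xs ih =>
    cases h : pvParse? x <;> simp [h, ih]

-- A's running maximum, characterised per key
theorem getD_foldl_insert_max (l : List (String × Int)) (d : PySem.Dict String Int) (k : String) :
    (l.foldl (fun d pr => d.insert pr.1 (max (d.getD pr.1 0) pr.2)) d).getD k 0
      = ((l.filter (fun pr => pr.1 == k)).map (·.2)).foldl max (d.getD k 0) := by
  induction l generalizing d with
  | nil => rfl
  | cons q l ih =>
    simp only [List.foldl_cons, List.filter_cons]
    rw [ih]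
    by_cases hk : q.1 = k
    · rw [if_pos (by simp [hk]), PySem.Dict.getD_insert, if_pos hk.symm, hk]
      simp
    · rw [if_neg (by simp [hk]), PySem.Dict.getD_insert, if_neg (fun h => hk h.symm)]

-- ===== VERDICT (by name: the statement is the Claim_ definition above) =====
theorem build_display_counters_py_spec : Claim_equal_build_display_counters_py := by
  intro ids _
  unfold Spec_build_display_counters_py build_display_counters_py build_display_counters_py_alt
  rw [foldl_parse, foldl_parse]
  set l := ids.filterMap pvParse? with hl
  have hnn : ∀ pr ∈ l, 0 ≤ pr.2 := by
    intro pr hpr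
    obtain ⟨did, _, hdid⟩ := List.mem_filterMap.mp (hl ▸ hpr)
    exact pvParse?_nonneg did pr.1 pr.2 (by rw [hdid])
  have hndA : (l.foldl (fun d pr => d.insert pr.1 (max (d.getD pr.1 0) pr.2))
      (PySem.Dict.empty : PySem.Dict String Int)).keys.Nodup :=
    PySem.Dict.nodup_keys_foldl_insert_key l (·.1) (fun d pr => max (d.getD pr.1 0) pr.2)
      PySem.Dict.empty PySem.Dict.nodup_keys_empty
  have hndB : (l.foldl (fun g pr => g.modify pr.1 [] (· ++ [pr.2]))
      (PySem.Dict.empty : PySem.Dict String (List Int))).keys.Nodup :=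
    PySem.Dict.nodup_keys_foldl_modify_key l (·.1) [] (fun _ pr => (· ++ [pr.2]))
      PySem.Dict.empty PySem.Dict.nodup_keys_empty
  have hkA : (l.foldl (fun d pr => d.insert pr.1 (max (d.getD pr.1 0) pr.2))
      (PySem.Dict.empty : PySem.Dict String Int)).keys = PySem.Set.ofList (l.map (·.1)) := by
    rw [PySem.Dict.keys_foldl_insert_key l (·.1) (fun d pr => max (d.getD pr.1 0) pr.2)
      PySem.Dict.empty, PySem.Dict.keys_empty, PySem.Set.update_nil_left]
  have hkB : (l.foldl (fun g pr => g.modify pr.1 [] (· ++ [pr.2]))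
      (PySem.Dict.empty : PySem.Dict String (List Int))).keys = PySem.Set.ofList (l.map (·.1)) := by
    rw [PySem.Dict.keys_foldl_modify_key l (·.1) [] (fun _ pr => (· ++ [pr.2]))
      PySem.Dict.empty, PySem.Dict.keys_empty, PySem.Set.update_nil_left]
  rw [PySem.Dict.items_eq_map_keys _ hndA 0, PySem.Dict.items_eq_map_keys _ hndB []]
  rw [hkA, hkB, List.map_map]
  apply List.map_congr_left
  intro k hk
  simp only [Function.comp]
  rw [getD_foldl_insert_max, PySem.Dict.getD_foldl_modify_append]
  simp only [PySem.Dict.getD_empty, List.nil_append]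
  set ms := (l.filter (fun pr => pr.1 == k)).map (·.2) with hms
  have hmem : ∀ m ∈ ms, 0 ≤ m := by
    intro m hm
    obtain ⟨pr, hpr, h2⟩ := List.mem_map.mp (hms ▸ hm)
    exact h2 ▸ hnn pr (List.mem_of_mem_filter hpr)
  have hne : ms ≠ [] := by
    have hkm : k ∈ l.map (·.1) := (PySem.Set.mem_ofList _ _).mp hk
    obtain ⟨pr, hpr, h2⟩ := List.mem_map.mp hkm
    intro hnil
    have : pr.2 ∈ ms := hms ▸ List.mem_map_of_mem (List.mem_filter.mpr ⟨hpr, by simp [h2]⟩)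
    simp [hnil] at this
  cases hms' : ms with
  | nil => exact absurd hms' hne
  | cons m t =>
    rw [PySem.List.max?_id_cons]
    simp only [Option.getD_some, List.foldl_cons]
    rw [max_eq_right (hmem m (hms' ▸ List.mem_cons_self))]
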